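-- pv_equiv track=rewrite | github.com/timbaek/dailyproblems | google/word_extensions.py | solution
-- ===== SOURCE A (Python) =====
-- def solution(s):
--   left,right,counter = 0,0,0
--   prev = ""
--
--   result = []
--   for i in range(len(s)):
--     if prev != s[i]:
--       if counter > 2:
--         result.append([left,right])
--       prev = s[i]
--       counter = 1
--       left, right = i, i
--     else:
--       counter += 1
--       right = i
--
--   if counter > 2:
--     result.append([left,right])
--
--   return result
-- ===== SOURCE B (Python) =====
-- def solution(s):
--     result = []
--     n = len(s)
--     i = 0
--     while i < n:
--         j = i
--         while j < n and s[j] == s[i]: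
--             j += 1
--         if j - i > 2:
--             result.append([i, j - 1])
--         i = j
--     return result
-- ===== Notes on version B (the rewrite author's own statement) =====
-- stated objective: simpler
-- what changed: Replaces A's index-by-index state machine (prev/counter/left/right with a trailing flush) by a two-pointer scan that jumps over each maximal run at once and emits its range directly.
import Mathlib
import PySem

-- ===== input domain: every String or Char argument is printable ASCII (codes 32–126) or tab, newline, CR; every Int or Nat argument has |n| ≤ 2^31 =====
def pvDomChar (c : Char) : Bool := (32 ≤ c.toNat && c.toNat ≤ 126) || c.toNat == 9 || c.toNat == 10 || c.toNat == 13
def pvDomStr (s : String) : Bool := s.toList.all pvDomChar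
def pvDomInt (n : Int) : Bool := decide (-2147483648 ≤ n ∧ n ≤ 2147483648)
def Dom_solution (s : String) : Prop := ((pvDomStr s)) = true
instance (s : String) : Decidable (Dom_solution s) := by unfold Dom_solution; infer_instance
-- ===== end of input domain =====

-- B replaces A's per-character state machine by a two-pointer scan over maximal runs; objective: simpler.

-- ===== PORT A =====
-- loop body of A, recursing over the characters with the current index i and the
-- state (left, right, counter, prev, result); the initial prev = "" is modelled as none.

def aLoop : List Char → Int → Int → Int → Int → Option Char → List (List Int) →
    Int × Int × Int × List (List Int)
  | [], _, left, right, counter, _, result => (left, right, counter, result)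
  | c :: cs, i, left, right, counter, prev, result =>
    if prev ≠ some c then
      aLoop cs (i + 1) i i 1 (some c)
        (if counter > 2 then result ++ [[left, right]] else result)
    else
      aLoop cs (i + 1) left i (counter + 1) prev result

def solution (s : String) : List (List Int) :=
  let r := aLoop s.toList 0 0 0 0 none []
  if r.2.2.1 > 2 then r.2.2.2 ++ [[r.1, r.2.1]] else r.2.2.2

-- ===== PORT B =====
-- Source B's outer while-loop: at position i the inner while advances j across the run
-- of s[i]; here that run is cs.takeWhile (· == c) and the recursion continues on the rest.
def bScan : List Char → Int → List (List Int)
  | [], _ => []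
  | c :: cs, i =>
      let L : Nat := (cs.takeWhile (· == c)).length + 1
      (if L > 2 then [[i, i + (L : Int) - 1]] else []) ++
        bScan (cs.dropWhile (· == c)) (i + (L : Int))
termination_by cs _ => cs.length
decreasing_by
  exact Nat.lt_succ_of_le (List.length_dropWhile_le _ _)

def solution_alt (s : String) : List (List Int) := bScan s.toList 0

-- ===== PRECONDITION & SPEC =====
def Spec_solution (s : String) (out : List (List Int)) : Prop := out = solution_alt s
instance (s : String) (out : List (List Int)) : Decidable (Spec_solution s out) := by unfold Spec_solution; infer_instance

-- ===== CLAIM (what is proved, stated in full; the proofs are below) =====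
def Claim_equal_solution : Prop := ∀ (s : String), Dom_solution s → Spec_solution s (solution s)

-- ===== LEMMAS AND PROOFS =====

def aFin (r : Int × Int × Int × List (List Int)) : List (List Int) :=
  if r.2.2.1 > 2 then r.2.2.2 ++ [[r.1, r.2.1]] else r.2.2.2

lemma aux (cs : List Char) : ∀ (c : Char) (k : Nat) (st : Int) (acc : List (List Int)),
    1 ≤ k →
    aFin (aLoop cs (st + k) st (st + k - 1) (k : Int) (some c) acc)
      = acc ++ (if k + (cs.takeWhile (· == c)).length > 2
                then [[st, st + ((k + (cs.takeWhile (· == c)).length : Nat) : Int) - 1]]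
                else [])
            ++ bScan (cs.dropWhile (· == c)) (st + ((k + (cs.takeWhile (· == c)).length : Nat) : Int)) := by
  induction cs with
  | nil =>
      intro c k st acc hk
      simp only [aLoop, aFin, List.takeWhile_nil, List.dropWhile_nil, bScan,
        Nat.add_zero, List.append_nil, List.length_nil]
      by_cases h : (k : Int) > 2
      · rw [if_pos h, if_pos (by exact_mod_cast h)]
      · rw [if_neg h, if_neg (by exact_mod_cast h), List.append_nil]
  | cons x cs ih =>
      intro c k st acc hk
      by_cases hx : x = c
      · subst hx
        simp only [aLoop, ne_eq, not_true_eq_false, if_false,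
          List.takeWhile_cons, List.dropWhile_cons, beq_self_eq_true, if_true,
          List.length_cons]
        have a1 : st + (k : Int) + 1 = st + ((k + 1 : Nat) : Int) := by push_cast; ring
        have a2 : st + (k : Int) = st + ((k + 1 : Nat) : Int) - 1 := by push_cast; ring
        have a3 : (k : Int) + 1 = ((k + 1 : Nat) : Int) := by push_cast; ring
        rw [a1, a2, a3, ih x (k + 1) st acc (by omega),
          show k + 1 + (cs.takeWhile (· == x)).length
              = k + ((cs.takeWhile (· == x)).length + 1) from by omega]
      · have hb : (x == c) = false := by simp [hx]
        have hne : ¬ (some c = some x) := by simp [eq_comm, hx]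
        simp only [aLoop, ne_eq, hne, not_false_eq_true, if_true,
          List.takeWhile_cons, List.dropWhile_cons, hb, Bool.false_eq_true, if_false,
          List.length_nil, Nat.add_zero]
        have H := ih x 1 (st + (k : Int))
          (if (k : Int) > 2 then acc ++ [[st, st + (k : Int) - 1]] else acc) le_rfl
        rw [show ((1 : Nat) : Int) = 1 from by norm_num] at H
        rw [show st + (k : Int) + 1 - 1 = st + (k : Int) from by ring] at H
        rw [Nat.add_comm 1 ((cs.takeWhile (· == x)).length)] at H
        rw [H, bScan]
        simp only [List.append_assoc]
        by_cases h : (k : Int) > 2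
        · rw [if_pos h, if_pos (by exact_mod_cast h : k > 2)]; simp
        · rw [if_neg h, if_neg (by exact_mod_cast h : ¬ k > 2)]; simp

lemma top (cs : List Char) : aFin (aLoop cs 0 0 0 0 none []) = bScan cs 0 := by
  cases cs with
  | nil => simp [aLoop, aFin, bScan]
  | cons x cs =>
      rw [aLoop]
      simp only [ne_eq, reduceCtorEq, not_false_eq_true, if_true,
        if_neg (by omega : ¬ ((0 : Int) > 2))]
      have H := aux cs x 1 0 [] le_rfl
      norm_num at H ⊢
      rw [H, bScan]
      simp [Nat.add_comm]

-- ===== VERDICT (by name: the statement is the Claim_ definition above) =====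
theorem solution_spec : Claim_equal_solution := by
  intro s _
  unfold Spec_solution solution solution_alt
  exact top s.toList
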